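-- pv_equiv track=rewrite | github.com/GridTools/stencil_benchmarks | plot.py | argsdiff
-- ===== SOURCE A (Python) =====
-- def argsdiff(argslist):
--     diffkeys = set()
--     first = argslist[0]
--     for a in argslist[1:]:
--         assert a.keys() == first.keys()
--         for k, v in first.items():
--             if a[k] != v:
--                 diffkeys.add(k)
--     return set(diffkeys)
-- ===== SOURCE B (Python) =====
-- def argsdiff(argslist):
--     first = argslist[0]
--     rest = argslist[1:]
--     for a in rest:
--         assert a.keys() == first.keys()
--     diff = []
--     pending = list(first)  # keys not yet known to differ, in first's order
--     for a in rest: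
--         still = []
--         for k in pending:
--             if a[k] != first[k]:
--                 diff.append(k)
--             else:
--                 still.append(k)
--         pending = still
--     return set(diff)
-- ===== Notes on version B (the rewrite author's own statement) =====
-- stated objective: alternative
-- what changed: Instead of rescanning every key of first for each dict and deduplicating through a set, B keeps a shrinking worklist of keys not yet seen to differ, partitioning it per dict into newly-differing keys (appended to the result once, no set needed) and still-equal keys; key-set assertions are hoisted into a separate first pass.
import Mathlib
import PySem

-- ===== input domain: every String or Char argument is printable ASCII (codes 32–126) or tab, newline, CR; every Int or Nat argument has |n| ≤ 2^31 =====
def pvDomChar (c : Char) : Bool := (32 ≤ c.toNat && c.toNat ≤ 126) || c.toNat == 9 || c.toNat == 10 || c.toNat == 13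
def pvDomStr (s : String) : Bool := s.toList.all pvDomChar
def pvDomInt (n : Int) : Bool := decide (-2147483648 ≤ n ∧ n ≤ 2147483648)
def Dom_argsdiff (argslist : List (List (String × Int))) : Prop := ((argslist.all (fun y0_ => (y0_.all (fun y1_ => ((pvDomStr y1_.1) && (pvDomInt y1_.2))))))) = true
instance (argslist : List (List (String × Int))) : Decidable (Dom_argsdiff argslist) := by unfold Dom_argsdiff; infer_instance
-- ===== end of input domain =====

-- B replaces A's per-dict full rescan of first's keys plus set-deduplication by a shrinking
-- worklist of not-yet-differing keys partitioned per dict (alternative decomposition; return value only).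

-- ===== PORT A =====
-- the assert (AssertionError) and a[k] on a missing key (KeyError) and argslist[0] on []
-- (IndexError) raise in Python; exactly those inputs are excluded by Pre_ below.
def argsdiff (argslist : List (List (String × Int))) : List String :=
  match argslist with
  | [] => []  -- IndexError in Python, outside Pre_
  | f :: rest =>
    let first := PySem.Dict.ofList f
    let diffkeys := rest.foldl
      (fun s a =>
        let ad := PySem.Dict.ofList a
        first.items.foldl
          (fun s kv => if ad.getD kv.1 0 ≠ kv.2 then PySem.Set.add s kv.1 else s) s)
      PySem.Set.empty
    PySem.Set.ofList diffkeys

-- ===== PORT B =====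
def argsdiff_alt (argslist : List (List (String × Int))) : List String :=
  match argslist with
  | [] => []  -- IndexError in Python, outside Pre_
  | f :: rest =>
    let first := PySem.Dict.ofList f
    -- the assert pass raises only outside Pre_ and computes nothing
    let res := rest.foldl
      (fun st a =>
        let ad := PySem.Dict.ofList a
        st.2.foldl
          (fun p k => if ad.getD k 0 ≠ first.getD k 0 then (p.1 ++ [k], p.2) else (p.1, p.2 ++ [k]))
          (st.1, ([] : List String)))
      (([] : List String), first.keys)
    PySem.Set.ofList res.1

-- ===== PRECONDITION & SPEC =====
-- Pre_ excludes exactly the raising inputs: the empty list (IndexError) and lists where some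
-- later dict's key set differs from the first's (AssertionError).
def Pre_argsdiff (argslist : List (List (String × Int))) : Prop :=
  argslist ≠ [] ∧ ∀ a ∈ argslist.drop 1,
    PySem.Set.equal (PySem.Dict.ofList a).keys (PySem.Dict.ofList (argslist.headD [])).keys = true
instance (argslist : List (List (String × Int))) : Decidable (Pre_argsdiff argslist) := by
  unfold Pre_argsdiff; infer_instance

def pvWitness_argsdiff : (List (List (String × Int))) :=
  [[("a", 1), ("b", 2)], [("a", 1), ("b", 3)]]

def Spec_argsdiff (argslist : List (List (String × Int))) (out : List String) : Prop := out = argsdiff_alt argslist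
instance (argslist : List (List (String × Int))) (out : List String) : Decidable (Spec_argsdiff argslist out) := by unfold Spec_argsdiff; infer_instance

-- ===== CLAIM (what is proved, stated in full; the proofs are below) =====
def Claim_equal_argsdiff : Prop := ∀ (argslist : List (List (String × Int))), Dom_argsdiff argslist → Pre_argsdiff argslist → Spec_argsdiff argslist (argsdiff argslist)

-- ===== LEMMAS AND PROOFS =====

-- A's inner loop over the keys: Set.add-if-differing appends the differing fresh keys.
lemma innerA (P : String → Prop) [DecidablePred P] (L : List String) (s : List String)
    (hnd : L.Nodup) :
    L.foldl (fun s k => if P k then PySem.Set.add s k else s) s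
      = s ++ L.filter (fun k => decide (P k) && !s.contains k) := by
  induction L generalizing s with
  | nil => simp
  | cons k L ih =>
    rcases List.nodup_cons.mp hnd with ⟨hk, hnd'⟩
    simp only [List.foldl_cons, List.filter_cons]
    by_cases hP : P k
    · by_cases hs : s.contains k = true
      · have hmem : k ∈ s := by simpa using hs
        have hadd : PySem.Set.add s k = s := by
          simp [PySem.Set.add, PySem.Set.contains, hmem]
        rw [if_pos hP, hadd, ih _ hnd']
        simp [hs, hP, hmem]
      · have hmem : k ∉ s := by simpa using hs
        have hadd : PySem.Set.add s k = s ++ [k] := by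
          simp [PySem.Set.add, PySem.Set.contains, hmem]
        rw [if_pos hP, hadd, ih _ hnd']
        have hfc : L.filter (fun j => decide (P j) && !(s ++ [k]).contains j)
            = L.filter (fun j => decide (P j) && !s.contains j) := by
          apply List.filter_congr
          intro j hj
          have hjk : j ≠ k := fun h => hk (h ▸ hj)
          simp [List.contains_append, hjk, beq_iff_eq]
        rw [hfc]
        simp [hP, hs, hmem]
    · rw [if_neg hP, ih _ hnd']
      simp [hP]

-- B's inner loop: partitioning the pending worklist.
lemma innerB (P : String → Prop) [DecidablePred P] (pending diff acc : List String) :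
    pending.foldl (fun p k => if P k then (p.1 ++ [k], p.2) else (p.1, p.2 ++ [k])) (diff, acc)
      = (diff ++ pending.filter (fun k => decide (P k)),
         acc ++ pending.filter (fun k => !decide (P k))) := by
  induction pending generalizing diff acc with
  | nil => simp
  | cons k pending ih =>
    by_cases hP : P k
    · simp [hP, ih]
    · simp [hP, ih]

-- The outer loop invariant: pending is exactly first's keys not yet in the accumulated set.
lemma outer_loop (first : PySem.Dict String Int)
    (rest : List (List (String × Int))) (s pending : List String)
    (hnd : first.keys.Nodup)
    (hinv : pending = first.keys.filter (fun k => !s.contains k)) :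
    (rest.foldl
      (fun st a =>
        st.2.foldl
          (fun p k => if (PySem.Dict.ofList a).getD k 0 ≠ first.getD k 0 then (p.1 ++ [k], p.2) else (p.1, p.2 ++ [k]))
          (st.1, ([] : List String)))
      (s, pending)).1
    = rest.foldl
      (fun s a =>
        first.keys.foldl
          (fun s k => if (PySem.Dict.ofList a).getD k 0 ≠ first.getD k 0 then PySem.Set.add s k else s) s)
      s := by
  induction rest generalizing s pending with
  | nil => rfl
  | cons a rest ih =>
    simp only [List.foldl_cons]
    rw [innerB (fun k => (PySem.Dict.ofList a).getD k 0 ≠ first.getD k 0) pending s []]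
    rw [innerA (fun k => (PySem.Dict.ofList a).getD k 0 ≠ first.getD k 0) first.keys s hnd]
    have hfilter : pending.filter (fun k => decide ((PySem.Dict.ofList a).getD k 0 ≠ first.getD k 0))
        = first.keys.filter (fun k => decide ((PySem.Dict.ofList a).getD k 0 ≠ first.getD k 0) && !s.contains k) := by
      rw [hinv, List.filter_filter]
    rw [hfilter]
    apply ih
    rw [hinv, List.filter_filter, List.nil_append]
    apply List.filter_congr
    intro k hkL
    have hcontains : ∀ (l : List String), l.contains k = decide (k ∈ l) := by
      intro l; by_cases h : k ∈ l <;> simp [h]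
    simp only [hcontains, List.mem_append, List.mem_filter, hkL]
    by_cases hks : k ∈ s
    · simp [hks]
    · by_cases hP : (PySem.Dict.ofList a).getD k 0 ≠ first.getD k 0
      · simp [hks, hP, hkL]
      · simp [hks, hP]

-- A's inner fold over items equals the same fold over the keys (keys are unique in a Dict).
lemma stepA_items_eq_keys (first : PySem.Dict String Int) (hnd : first.keys.Nodup)
    (a : List (String × Int)) (s : List String) :
    first.items.foldl
      (fun s kv => if (PySem.Dict.ofList a).getD kv.1 0 ≠ kv.2 then PySem.Set.add s kv.1 else s) s
    = first.keys.foldl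
      (fun s k => if (PySem.Dict.ofList a).getD k 0 ≠ first.getD k 0 then PySem.Set.add s k else s) s := by
  rw [PySem.Dict.items_eq_map_keys first hnd 0, List.foldl_map]

-- ===== VERDICT (by name: the statement is the Claim_ definition above) =====
theorem argsdiff_spec : Claim_equal_argsdiff := by
  intro argslist _ hpre
  unfold Spec_argsdiff
  cases argslist with
  | nil => exact absurd rfl hpre.1
  | cons f rest =>
    simp only [argsdiff, argsdiff_alt]
    have hnd : (PySem.Dict.ofList f).keys.Nodup := PySem.Dict.nodup_keys_ofList f
    have hstep : (fun (s : List String) (a : List (String × Int)) =>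
        (PySem.Dict.ofList f).items.foldl
          (fun s kv => if (PySem.Dict.ofList a).getD kv.1 0 ≠ kv.2 then PySem.Set.add s kv.1 else s) s)
      = (fun (s : List String) (a : List (String × Int)) =>
        (PySem.Dict.ofList f).keys.foldl
          (fun s k => if (PySem.Dict.ofList a).getD k 0 ≠ (PySem.Dict.ofList f).getD k 0 then PySem.Set.add s k else s) s) :=
      funext fun s => funext fun a => stepA_items_eq_keys (PySem.Dict.ofList f) hnd a s
    rw [hstep]
    congr 1
    exact (outer_loop (PySem.Dict.ofList f) rest [] (PySem.Dict.ofList f).keys hnd (by simp)).symm
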